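-- pv_equiv track=rewrite | github.com/dav1a1223/junyia | 2.py | list_num
-- ===== SOURCE A (Python) =====
-- def list_num(n):
--     ans = 0
--     for i in range(1, n+1):
--         if i % 15 == 0:
--             ans += 1
--         elif i % 3 == 0 or i % 5 == 0:
--             continue
--         else:
--             ans += 1
--     return ans
-- ===== SOURCE B (Python) =====
-- def list_num(n):
--     if n <= 0:
--         return 0
--     return n - n // 3 - n // 5 + 2 * (n // 15)
-- ===== Notes on version B (the rewrite author's own statement) =====
-- stated objective: faster
-- what changed: Replaced the O(n) loop over 1..n with a closed-form inclusion-exclusion count n - n//3 - n//5 + 2*(n//15).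
import Mathlib
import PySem

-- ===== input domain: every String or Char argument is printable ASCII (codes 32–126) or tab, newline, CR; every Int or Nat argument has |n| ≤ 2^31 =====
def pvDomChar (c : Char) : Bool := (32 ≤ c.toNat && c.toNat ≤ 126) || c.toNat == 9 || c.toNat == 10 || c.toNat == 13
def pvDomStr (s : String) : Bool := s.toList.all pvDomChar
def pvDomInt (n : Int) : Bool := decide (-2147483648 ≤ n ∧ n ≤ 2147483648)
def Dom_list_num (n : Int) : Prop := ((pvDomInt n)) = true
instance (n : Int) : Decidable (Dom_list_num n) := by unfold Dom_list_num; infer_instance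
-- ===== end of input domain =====

-- B replaces A's O(n) loop over 1..n with a closed-form inclusion-exclusion count (objective: faster).

-- ===== PORT A =====
def list_num (n : Int) : Int :=
  (PySem.List.pyRange 1 (n + 1) 1).foldl
    (fun ans i =>
      if PySem.Int.mod i 15 = 0 then ans + 1
      else if PySem.Int.mod i 3 = 0 ∨ PySem.Int.mod i 5 = 0 then ans
      else ans + 1) 0

-- ===== PORT B =====
def list_num_alt (n : Int) : Int :=
  if n ≤ 0 then 0
  else n - PySem.Int.floordiv n 3 - PySem.Int.floordiv n 5 + 2 * PySem.Int.floordiv n 15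

-- ===== PRECONDITION & SPEC =====
def Spec_list_num (n : Int) (out : Int) : Prop := out = list_num_alt n
instance (n : Int) (out : Int) : Decidable (Spec_list_num n out) := by unfold Spec_list_num; infer_instance

-- ===== CLAIM (what is proved, stated in full; the proofs are below) =====
def Claim_equal_list_num : Prop := ∀ (n : Int), Dom_list_num n → Spec_list_num n (list_num n)

-- ===== LEMMAS AND PROOFS =====

lemma list_num_fold_eq (m : Nat) :
    list_num (m : Int) = (m : Int) - (m : Int) / 3 - (m : Int) / 5 + 2 * ((m : Int) / 15) := by
  induction m with
  | zero =>
      simp [list_num, PySem.List.pyRange_one_eq_nil]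
  | succ k ih =>
      have h : ((k : Int) + 1 + 1) = ((k : Int) + 1) + 1 := by ring
      have hsplit := PySem.List.pyRange_one_succ_right (a := 1) (b := (k : Int) + 1) (by omega)
      unfold list_num at ih ⊢
      push_cast
      rw [h, hsplit, List.foldl_append, ih]
      simp only [List.foldl_cons, List.foldl_nil]
      rw [PySem.Int.mod_eq_emod_of_pos (b:=15) (by norm_num),
          PySem.Int.mod_eq_emod_of_pos (b:=3) (by norm_num),
          PySem.Int.mod_eq_emod_of_pos (b:=5) (by norm_num)]
      have hm3 := Int.emod_emod_of_dvd ((k : Int) + 1) (by decide : (3:Int) ∣ 15)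
      have hm5 := Int.emod_emod_of_dvd ((k : Int) + 1) (by decide : (5:Int) ∣ 15)
      have a3 : ((k:Int)+1)/3 = (k:Int)/3 + (if ((k:Int)+1)%3 = 0 then 1 else 0) := by
        split_ifs <;> omega
      have a5 : ((k:Int)+1)/5 = (k:Int)/5 + (if ((k:Int)+1)%5 = 0 then 1 else 0) := by
        split_ifs <;> omega
      have a15 : ((k:Int)+1)/15 = (k:Int)/15 + (if ((k:Int)+1)%15 = 0 then 1 else 0) := by
        split_ifs <;> omega
      rw [a3, a5, a15]
      split_ifs <;> omega

lemma list_num_eq_alt (n : Int) : list_num n = list_num_alt n := by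
  by_cases hn : n ≤ 0
  · unfold list_num list_num_alt
    rw [PySem.List.pyRange_one_eq_nil (by omega)]
    simp [hn]
  · have hpos : 0 < n := by omega
    obtain ⟨m, rfl⟩ : ∃ m : Nat, n = (m : Int) := ⟨n.toNat, by omega⟩
    rw [list_num_fold_eq m]
    unfold list_num_alt
    rw [if_neg hn,
        PySem.Int.floordiv_eq_ediv_of_pos (b:=3) (by norm_num),
        PySem.Int.floordiv_eq_ediv_of_pos (b:=5) (by norm_num),
        PySem.Int.floordiv_eq_ediv_of_pos (b:=15) (by norm_num)]

-- ===== VERDICT (by name: the statement is the Claim_ definition above) =====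
theorem list_num_spec : Claim_equal_list_num := by
  intro n _
  unfold Spec_list_num
  exact list_num_eq_alt n
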